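-- pv_equiv track=rewrite | github.com/solidk1/ai-dev-kit-steve | .test/scripts/trace_to_examples.py | _categorize_by_tools
-- ===== SOURCE A (Python) =====
-- def _categorize_by_tools(tool_names: list[str]) -> str:
--     """Infer category from tool usage in the turn."""
--     if any("sql" in t.lower() or "dbsql" in t.lower() for t in tool_names):
--         return "sql"
--     if any("bash" in t.lower() for t in tool_names):
--         return "deployment"
--     if any("write" in t.lower() or "edit" in t.lower() for t in tool_names):
--         return "code_generation"
--     return "general"
-- ===== SOURCE B (Python) =====
-- def _categorize_by_tools(tool_names: list[str]) -> str:
--     """Infer category from tool usage in the turn."""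
--     has_sql = has_bash = has_code = False
--     for t in tool_names:
--         n = t.lower()
--         if "sql" in n or "dbsql" in n:
--             has_sql = True
--         if "bash" in n:
--             has_bash = True
--         if "write" in n or "edit" in n:
--             has_code = True
--     if has_sql:
--         return "sql"
--     if has_bash:
--         return "deployment"
--     if has_code:
--         return "code_generation"
--     return "general"
-- ===== Notes on version B (the rewrite author's own statement) =====
-- stated objective: faster
-- what changed: Replaces three separate any() scans over the list (each lowercasing every name again, twice per predicate) with a single evidence-collecting pass that lowercases each name once and sets three booleans, followed by one priority decision.
import Mathlib
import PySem

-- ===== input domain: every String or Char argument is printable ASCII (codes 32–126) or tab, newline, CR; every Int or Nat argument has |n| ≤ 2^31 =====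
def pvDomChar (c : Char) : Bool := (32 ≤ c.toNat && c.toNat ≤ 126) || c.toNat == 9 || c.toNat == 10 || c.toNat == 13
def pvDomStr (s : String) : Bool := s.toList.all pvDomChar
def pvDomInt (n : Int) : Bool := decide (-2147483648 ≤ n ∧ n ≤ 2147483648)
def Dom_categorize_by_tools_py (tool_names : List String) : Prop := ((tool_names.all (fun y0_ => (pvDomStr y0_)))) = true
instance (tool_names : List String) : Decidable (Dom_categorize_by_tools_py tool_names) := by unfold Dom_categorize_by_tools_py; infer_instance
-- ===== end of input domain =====

-- B replaces A's three separate any() scans with one evidence-collecting pass and a priority decision (alternative decomposition, same cost).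

-- ===== PORT A =====
def categorize_by_tools_py (tool_names : List String) : String :=
  if tool_names.any (fun t => PySem.Str.isIn "sql" (PySem.Str.lower t) || PySem.Str.isIn "dbsql" (PySem.Str.lower t)) then "sql"
  else if tool_names.any (fun t => PySem.Str.isIn "bash" (PySem.Str.lower t)) then "deployment"
  else if tool_names.any (fun t => PySem.Str.isIn "write" (PySem.Str.lower t) || PySem.Str.isIn "edit" (PySem.Str.lower t)) then "code_generation"
  else "general"

-- ===== PORT B =====
-- single pass over the names, accumulating (has_sql, has_bash, has_code)
def categorizeAltLoop : List String → Bool → Bool → Bool → Bool × Bool × Bool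
  | [], hs, hb, hc => (hs, hb, hc)
  | t :: ts, hs, hb, hc =>
    let n := PySem.Str.lower t
    categorizeAltLoop ts
      (hs || (PySem.Str.isIn "sql" n || PySem.Str.isIn "dbsql" n))
      (hb || PySem.Str.isIn "bash" n)
      (hc || (PySem.Str.isIn "write" n || PySem.Str.isIn "edit" n))

def categorize_by_tools_py_alt (tool_names : List String) : String :=
  let r := categorizeAltLoop tool_names false false false
  if r.1 then "sql"
  else if r.2.1 then "deployment"
  else if r.2.2 then "code_generation"
  else "general"

-- ===== PRECONDITION & SPEC =====
def Spec_categorize_by_tools_py (tool_names : List String) (out : String) : Prop := out = categorize_by_tools_py_alt tool_names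
instance (tool_names : List String) (out : String) : Decidable (Spec_categorize_by_tools_py tool_names out) := by unfold Spec_categorize_by_tools_py; infer_instance

-- ===== CLAIM (what is proved, stated in full; the proofs are below) =====
def Claim_equal_categorize_by_tools_py : Prop := ∀ (tool_names : List String), Dom_categorize_by_tools_py tool_names → Spec_categorize_by_tools_py tool_names (categorize_by_tools_py tool_names)

-- ===== LEMMAS AND PROOFS =====
theorem categorizeAltLoop_eq (ts : List String) (hs hb hc : Bool) :
    categorizeAltLoop ts hs hb hc =
      (hs || ts.any (fun t => PySem.Str.isIn "sql" (PySem.Str.lower t) || PySem.Str.isIn "dbsql" (PySem.Str.lower t)),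
       hb || ts.any (fun t => PySem.Str.isIn "bash" (PySem.Str.lower t)),
       hc || ts.any (fun t => PySem.Str.isIn "write" (PySem.Str.lower t) || PySem.Str.isIn "edit" (PySem.Str.lower t))) := by
  induction ts generalizing hs hb hc with
  | nil => simp [categorizeAltLoop]
  | cons t ts ih => simp [categorizeAltLoop, ih, Bool.or_assoc]

-- ===== VERDICT (by name: the statement is the Claim_ definition above) =====
theorem categorize_by_tools_py_spec : Claim_equal_categorize_by_tools_py := by
  intro tool_names _
  unfold Spec_categorize_by_tools_py categorize_by_tools_py categorize_by_tools_py_alt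
  simp [categorizeAltLoop_eq]
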